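-- pv_equiv track=rewrite | github.com/Rachitverma2006/computer-programming | coding-assignment/string/string_q06.py | RedOrGreen
-- ===== SOURCE A (Python) =====
-- def RedOrGreen(s):
--     c = 0
--     r = s.count("R")
--     g = s.count("G")
--     for i in s:
--         if r > g:
--             if i == "G":
--                 c += 1
--         else:
--             if i == "R":
--                 c += 1
--     return c
-- ===== SOURCE B (Python) =====
-- def RedOrGreen(s):
--     r = s.count("R")
--     g = s.count("G")
--     return g if r > g else r
-- ===== Notes on version B (the rewrite author's own statement) =====
-- stated objective: simpler
-- what changed: Replaces the per-character accumulating loop with direct selection of the minority count already computed by the two .count passes (closed form g if r > g else r).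
import Mathlib
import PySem

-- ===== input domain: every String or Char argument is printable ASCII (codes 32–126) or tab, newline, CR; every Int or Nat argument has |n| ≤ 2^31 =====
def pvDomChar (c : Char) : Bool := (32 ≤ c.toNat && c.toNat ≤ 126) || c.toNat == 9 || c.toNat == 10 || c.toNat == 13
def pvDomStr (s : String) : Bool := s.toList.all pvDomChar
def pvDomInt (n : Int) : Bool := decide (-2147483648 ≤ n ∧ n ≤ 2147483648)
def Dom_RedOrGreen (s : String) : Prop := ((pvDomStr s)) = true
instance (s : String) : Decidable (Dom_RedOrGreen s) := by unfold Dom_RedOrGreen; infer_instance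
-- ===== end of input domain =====

-- ===== PORT A =====
-- B replaces A's per-character accumulating loop with direct selection of the minority count (same value; simpler).
def RedOrGreen (s : String) : Int :=
  let c : Int := 0
  let r := PySem.Str.count s "R"
  let g := PySem.Str.count s "G"
  s.toList.foldl (fun c i =>
    if r > g then (if i == 'G' then c + 1 else c)
    else (if i == 'R' then c + 1 else c)) c

-- ===== PORT B =====
def RedOrGreen_alt (s : String) : Int :=
  let r := PySem.Str.count s "R"
  let g := PySem.Str.count s "G"
  if r > g then (g : Int) else (r : Int)

-- ===== PRECONDITION & SPEC =====
def Spec_RedOrGreen (s : String) (out : Int) : Prop := out = RedOrGreen_alt s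
instance (s : String) (out : Int) : Decidable (Spec_RedOrGreen s out) := by unfold Spec_RedOrGreen; infer_instance

-- ===== CLAIM (what is proved, stated in full; the proofs are below) =====
def Claim_equal_RedOrGreen : Prop := ∀ (s : String), Dom_RedOrGreen s → Spec_RedOrGreen s (RedOrGreen s)

-- ===== LEMMAS AND PROOFS =====
theorem go_singleton (ch : Char) : ∀ (l : List Char) (fuel acc : Nat), l.length ≤ fuel →
    PySem.Chars.count.go [ch] fuel l acc = acc + l.count ch := by
  intro l
  induction l with
  | nil =>
    intro fuel acc _
    cases fuel <;> simp [PySem.Chars.count.go]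
  | cons a t ih =>
    intro fuel acc h
    cases fuel with
    | zero => simp at h
    | succ n =>
      rw [PySem.Chars.count.go]
      have h1 := ih n (acc + 1) (by simpa using h)
      have h2 := ih n acc (by simpa using h)
      by_cases hc : ch = a
      · subst hc
        simp [List.isPrefixOf, h1]
        omega
      · simp [List.isPrefixOf, hc, h2, Ne.symm hc]

theorem count_singleton_eq (l : List Char) (ch : Char) :
    PySem.Chars.count l [ch] = l.count ch := by
  rw [PySem.Chars.count]
  simp [go_singleton ch l l.length 0 le_rfl]

-- ===== VERDICT (by name: the statement is the Claim_ definition above) =====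
theorem RedOrGreen_spec : Claim_equal_RedOrGreen := by
  intro s _
  unfold Spec_RedOrGreen RedOrGreen RedOrGreen_alt
  simp only [PySem.Str.count_eq]
  have hR : PySem.Chars.count s.toList "R".toList = s.toList.count 'R' := count_singleton_eq _ _
  have hG : PySem.Chars.count s.toList "G".toList = s.toList.count 'G' := count_singleton_eq _ _
  simp only [hR, hG]
  by_cases h : s.toList.count 'G' < s.toList.count 'R' <;>
    simp [h, PySem.List.foldl_ite_add_one] <;> simp [List.count_eq_countP, eq_comm] <;> rfl
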